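-- pv_equiv track=rewrite | github.com/sinafeizi/M.Sc.-Main-Thesis-Codes-and-Files | GA_2018.py | remove_extra_pairings
-- ===== SOURCE A (Python) =====
-- def remove_extra_pairings(a_chromosome, list_of_all_pairings):
--     main_counter = 0
--     for i in range(len(a_chromosome)):
--         if a_chromosome[i] == 1:
--             counter1 = 0
--             for j in range(len(list_of_all_pairings[i]) - 1):
--                 counter2 = 0
--                 for k in range(len(a_chromosome)):
--                     if a_chromosome[k] == 1 and k != i:
--                         if list_of_all_pairings[i][j] in list_of_all_pairings[k]:
--                             counter2 += 1
--                 if counter2 >= 1: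
--                     counter1 += 1
--             if counter1 == len(list_of_all_pairings[i]) - 1:
--                 a_chromosome[i] = 0
--                 main_counter += 1
--             else:
--                 pass
--     return a_chromosome
-- ===== SOURCE B (Python) =====
-- def remove_extra_pairings(a_chromosome, list_of_all_pairings):
--     # One pass of bookkeeping: cnt[v] = number of currently-selected pairings containing v.
--     cnt = {}
--     for i in range(len(a_chromosome)):
--         if a_chromosome[i] == 1:
--             for v in set(list_of_all_pairings[i]):
--                 cnt[v] = cnt.get(v, 0) + 1
--     for i in range(len(a_chromosome)):
--         if a_chromosome[i] == 1:
--             p = list_of_all_pairings[i]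
--             if p and all(cnt.get(v, 0) >= 2 for v in p[:-1]):
--                 a_chromosome[i] = 0
--                 for v in set(p):
--                     cnt[v] -= 1
--     return a_chromosome
-- ===== Notes on version B (the rewrite author's own statement) =====
-- stated objective: alternative
-- what changed: Replaces the inner scan over all other selected pairings (repeated for every element of every selected pairing) by a dict counting, per element value, how many currently-selected pairings contain it, built once and decremented when a pairing is removed; a pairing is redundant iff every non-last element has count >= 2.
import Mathlib
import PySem

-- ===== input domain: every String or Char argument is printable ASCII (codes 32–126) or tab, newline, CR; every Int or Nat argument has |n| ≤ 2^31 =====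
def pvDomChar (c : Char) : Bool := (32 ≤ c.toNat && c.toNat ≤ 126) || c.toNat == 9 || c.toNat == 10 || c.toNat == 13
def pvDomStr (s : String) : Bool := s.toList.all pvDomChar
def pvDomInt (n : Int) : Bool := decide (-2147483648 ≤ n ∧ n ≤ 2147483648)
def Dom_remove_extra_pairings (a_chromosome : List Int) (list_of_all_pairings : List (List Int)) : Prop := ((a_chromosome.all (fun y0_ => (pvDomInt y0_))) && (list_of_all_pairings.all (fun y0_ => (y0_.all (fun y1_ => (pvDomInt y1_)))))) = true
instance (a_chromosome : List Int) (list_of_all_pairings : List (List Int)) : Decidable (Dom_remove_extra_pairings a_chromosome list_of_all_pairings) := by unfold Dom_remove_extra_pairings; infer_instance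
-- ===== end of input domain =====

-- B replaces A's per-element scan over all other selected pairings by a dict of
-- per-value containment counts maintained across removals (a different algorithm).
-- Both A and B mutate a_chromosome in place in Python; the equivalence proved here
-- is about the returned list (which is that same list).


-- ===== PORT A =====
def remove_extra_pairings (a_chromosome : List Int) (list_of_all_pairings : List (List Int)) : List Int :=
  ((PySem.List.pyRange 0 a_chromosome.length 1).foldl (fun (st : List Int × Int) i =>
    let a := st.1
    if PySem.List.pyGetD a i 0 == 1 then
      let counter1 : Int :=
        (PySem.List.pyRange 0 ((PySem.List.pyGetD list_of_all_pairings i []).length - 1 : Int) 1).foldl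
          (fun (c1 : Int) j =>
            let counter2 : Int :=
              (PySem.List.pyRange 0 (a.length : Int) 1).foldl (fun (c2 : Int) k =>
                if PySem.List.pyGetD a k 0 == 1 && k != i then
                  if (PySem.List.pyGetD list_of_all_pairings k []).contains
                       (PySem.List.pyGetD (PySem.List.pyGetD list_of_all_pairings i []) j 0) then
                    c2 + 1
                  else c2
                else c2) 0
            if counter2 ≥ 1 then c1 + 1 else c1) 0
      if counter1 == ((PySem.List.pyGetD list_of_all_pairings i []).length - 1 : Int) then
        (PySem.List.pySetD a i 0, st.2 + 1)
      else st
    else st) (a_chromosome, 0)).1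

-- ===== PORT B =====
def remove_extra_pairings_alt (a_chromosome : List Int) (list_of_all_pairings : List (List Int)) : List Int :=
  let cnt0 : PySem.Dict Int Int :=
    (PySem.List.pyRange 0 a_chromosome.length 1).foldl (fun (cnt : PySem.Dict Int Int) i =>
      if PySem.List.pyGetD a_chromosome i 0 == 1 then
        (PySem.Set.ofList (PySem.List.pyGetD list_of_all_pairings i [])).foldl
          (fun cnt v => cnt.insert v (cnt.getD v 0 + 1)) cnt
      else cnt) PySem.Dict.empty
  ((PySem.List.pyRange 0 a_chromosome.length 1).foldl (fun (st : PySem.Dict Int Int × List Int) i =>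
    let cnt := st.1
    let a := st.2
    if PySem.List.pyGetD a i 0 == 1 then
      let p := PySem.List.pyGetD list_of_all_pairings i []
      if !p.isEmpty && (PySem.List.slice p none (some (-1))).all (fun v => cnt.getD v 0 ≥ 2) then
        ((PySem.Set.ofList p).foldl (fun cnt v => cnt.modify v 0 (fun t => t - 1)) cnt,
         PySem.List.pySetD a i 0)
      else st
    else st) (cnt0, a_chromosome)).2

-- ===== PRECONDITION & SPEC =====
-- A raises IndexError iff some index selected by the chromosome has no pairing list
-- (list_of_all_pairings too short); Pre_ excludes exactly those inputs.
def Pre_remove_extra_pairings (a_chromosome : List Int) (list_of_all_pairings : List (List Int)) : Prop :=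
  ∀ i : Nat, i < a_chromosome.length → a_chromosome.getD i 0 = 1 → i < list_of_all_pairings.length
instance (a_chromosome : List Int) (list_of_all_pairings : List (List Int)) : Decidable (Pre_remove_extra_pairings a_chromosome list_of_all_pairings) := by unfold Pre_remove_extra_pairings; infer_instance

def pvWitness_remove_extra_pairings : List Int × List (List Int) :=
  ([1, 0, 1, 1], [[2, 3], [9], [2, 5], [3, 5]])

def Spec_remove_extra_pairings (a_chromosome : List Int) (list_of_all_pairings : List (List Int)) (out : List Int) : Prop := out = remove_extra_pairings_alt a_chromosome list_of_all_pairings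
instance (a_chromosome : List Int) (list_of_all_pairings : List (List Int)) (out : List Int) : Decidable (Spec_remove_extra_pairings a_chromosome list_of_all_pairings out) := by unfold Spec_remove_extra_pairings; infer_instance

-- ===== CLAIM (what is proved, stated in full; the proofs are below) =====
def Claim_equal_remove_extra_pairings : Prop := ∀ (a_chromosome : List Int) (list_of_all_pairings : List (List Int)), Dom_remove_extra_pairings a_chromosome list_of_all_pairings → Pre_remove_extra_pairings a_chromosome list_of_all_pairings → Spec_remove_extra_pairings a_chromosome list_of_all_pairings (remove_extra_pairings a_chromosome list_of_all_pairings)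

-- ===== LEMMAS AND PROOFS =====

-- Proof-side vocabulary: cov ps a v = how many currently-selected indices' pairings contain v.
def covP (ps : List (List Int)) (a : List Int) (v : Int) (k : Nat) : Bool :=
  a.getD k 0 == 1 && (ps.getD k []).contains v

def cov (ps : List (List Int)) (a : List Int) (v : Int) : Nat :=
  (List.range a.length).countP (covP ps a v)

-- the common reference step: remove index i iff selected, pairing nonempty, and every
-- non-last element is covered by at least two currently-selected pairings
def stepS (ps : List (List Int)) (a : List Int) (i : Nat) : List Int :=
  if a.getD i 0 == 1 && (!(ps.getD i []).isEmpty
      && (ps.getD i []).dropLast.all (fun v => decide (2 ≤ cov ps a v)))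
  then a.set i 0 else a

def goodIdx (ps : List (List Int)) (a : List Int) : Prop :=
  ∀ k : Nat, a.getD k 0 = 1 → k < ps.length

lemma goodIdx_set_zero (ps : List (List Int)) (a : List Int) (i : Nat)
    (h : goodIdx ps a) : goodIdx ps (a.set i 0) := by
  intro k hk
  apply h k
  simp only [List.getD, List.getElem?_set] at hk
  split at hk
  · split at hk
    · simp at hk
    · simp at hk
  · exact hk

lemma foldl_proj {σ α β : Type} (P : σ → Prop) (F : σ → β → σ) (g : α → β → α) (proj : σ → α)
    (hstep : ∀ st k, P st → proj (F st k) = g (proj st) k)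
    (hpres : ∀ st k, P st → P (F st k)) :
    ∀ (l : List β) (st : σ), P st → proj (l.foldl F st) = l.foldl g (proj st) := by
  intro l
  induction l with
  | nil => intro st _; rfl
  | cons x l ih =>
    intro st hst
    simp only [List.foldl_cons]
    rw [ih (F st x) (hpres st x hst), hstep st x hst]

lemma countP_congr_except (l : List Nat) (hl : l.Nodup) (i : Nat) (hi : i ∈ l)
    (f g : Nat → Bool) (hfg : ∀ k ∈ l, k ≠ i → f k = g k) :
    l.countP f + (if g i then 1 else 0) = l.countP g + (if f i then 1 else 0) := by
  induction l with
  | nil => cases hi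
  | cons a l ih =>
    rcases List.nodup_cons.mp hl with ⟨ha, hl'⟩
    simp only [List.countP_cons]
    rcases List.mem_cons.mp hi with hi | hi
    · subst hi
      have hcongr : l.countP f = l.countP g :=
        List.countP_congr (fun k hk => by
          rw [hfg k (List.mem_cons_of_mem _ hk) (fun he => ha (he ▸ hk))])
      rw [hcongr]; omega
    · have hai : a ≠ i := fun he => ha (he ▸ hi)
      have hfa : f a = g a := hfg a (List.mem_cons_self ..) hai
      have := ih hl' hi (fun k hk hki => hfg k (List.mem_cons_of_mem _ hk) hki)
      rw [hfa]; omega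

lemma count_nodup (s : List Int) (h : s.Nodup) (v : Int) :
    s.count v = if v ∈ s then 1 else 0 := by
  induction s with
  | nil => simp
  | cons a s ih =>
    rcases List.nodup_cons.mp h with ⟨ha, hs⟩
    by_cases hva : v = a
    · subst hva
      rw [List.count_cons_self, ih hs, if_neg ha, if_pos (List.mem_cons_self ..)]
    · rw [List.count_cons]
      simp [hva, Ne.symm hva, ih hs]

lemma cov_set_zero (ps : List (List Int)) (a : List Int) (k : Nat)
    (hk : k < a.length) (ha : a.getD k 0 = 1) (v : Int) :
    cov ps a v = cov ps (a.set k 0) v + (if (ps.getD k []).contains v then 1 else 0) := by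
  unfold cov covP
  have hset0 : (a.set k 0).getD k 0 = 0 := by
    simp [List.getD, List.getElem?_set, hk]
  have key := countP_congr_except (List.range a.length) List.nodup_range k (List.mem_range.mpr hk)
      (fun j => (a.set k 0).getD j 0 == 1 && (ps.getD j []).contains v)
      (fun j => a.getD j 0 == 1 && (ps.getD j []).contains v)
      (fun j _ hji => by
        have hgd : (a.set k 0).getD j 0 = a.getD j 0 := by
          simp [List.getD, List.getElem?_set, Ne.symm hji]
        simp only [hgd])
  rw [List.length_set]
  simp only [hset0, ha] at key
  by_cases hc : (ps.getD k []).contains v <;> simp [hc] at key ⊢ <;> omega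

lemma forall_mem_dropLast (p : List Int) (P : Int → Prop) :
    (∀ v ∈ p.dropLast, P v) ↔ (∀ j : Nat, j < p.length - 1 → P (p.getD j 0)) := by
  constructor
  · intro h j hj
    have hj2 : j < p.length := by omega
    have hj1 : j < p.dropLast.length := by simp [List.length_dropLast]; omega
    have := h (p.dropLast[j]'hj1) (List.getElem_mem hj1)
    rwa [List.getElem_dropLast, ← List.getD_eq_getElem _ _ hj2] at this
  · intro h v hv
    obtain ⟨j, hj, rfl⟩ := List.mem_iff_getElem.mp hv
    have hj' : j < p.length - 1 := by simpa [List.length_dropLast] using hj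
    have hj2 : j < p.length := by omega
    have := h j hj'
    rwa [List.getD_eq_getElem _ _ hj2, ← List.getElem_dropLast (h := hj)] at this

-- A's innermost loop is a count
lemma counter2_val (ps : List (List Int)) (a : List Int) (i : Nat) (v : Int) (l : List Nat) (c : Int) :
    l.foldl (fun (c2 : Int) (kk : Nat) =>
      if a.getD kk 0 == 1 && (kk : Int) != (i : Int) then
        if (ps.getD kk []).contains v then c2 + 1 else c2
      else c2) c
    = c + (l.countP (fun kk => (a.getD kk 0 == 1 && !(kk == i)) && (ps.getD kk []).contains v) : Int) := by
  induction l generalizing c with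
  | nil => simp
  | cons kk l ih =>
    simp only [List.foldl_cons, List.countP_cons, ih]
    have hbe : ((kk : Int) != (i : Int)) = !(kk == i) := by simp [bne]
    rw [hbe]
    cases h1 : (a.getD kk 0 == 1) <;>
      cases h2 : (kk == i) <;>
        cases h3 : ((ps.getD kk []).contains v) <;>
          simp only [h1, h2, h3, Bool.and_true, Bool.and_false, Bool.true_and, Bool.false_and,
            Bool.not_true, Bool.not_false] <;>
          simp <;> push_cast <;> omega

lemma counter2_pos_iff (ps : List (List Int)) (a : List Int) (i : Nat) (v : Int)
    (hi : i < a.length) (h1 : a.getD i 0 = 1) (hv : v ∈ ps.getD i []) :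
    (1 ≤ ((List.range a.length).countP
        (fun kk => (a.getD kk 0 == 1 && !(kk == i)) && (ps.getD kk []).contains v) : Int))
      ↔ 2 ≤ cov ps a v := by
  have hcont : (ps.getD i []).contains v = true := by simpa using hv
  have key := countP_congr_except (List.range a.length) List.nodup_range i (List.mem_range.mpr hi)
      (fun kk => (a.getD kk 0 == 1 && !(kk == i)) && (ps.getD kk []).contains v)
      (covP ps a v)
      (fun kk _ hki => by
        have hb : (kk == i) = false := by simpa using hki
        unfold covP
        simp only [hb, Bool.not_false, Bool.and_true])
  have hfi : ((a.getD i 0 == 1 && !(i == i)) && (ps.getD i []).contains v) = false := by simp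
  have hgi : covP ps a v i = true := by
    unfold covP
    rw [h1, hcont]
    simp
  simp only [hfi, hgi, Bool.false_eq_true, eq_self_iff_true, if_true, if_false] at key
  unfold cov
  omega

lemma foldl_count_ite (l : List Nat) (p : Nat → Prop) [DecidablePred p] (c : Int) :
    l.foldl (fun (acc : Int) x => if p x then acc + 1 else acc) c
      = c + (l.countP (fun x => decide (p x)) : Int) := by
  induction l generalizing c with
  | nil => simp
  | cons x l ih =>
    simp only [List.foldl_cons, List.countP_cons, ih]
    by_cases hx : p x <;> simp [hx] <;> push_cast <;> try ring

lemma count_nodup_ofList_eq (pk : List Int) (v : Int) {b : Bool} (hc : pk.contains v = b) :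
    (PySem.Set.ofList pk).count v = if b then 1 else 0 := by
  rw [count_nodup _ (PySem.Set.nodup_ofList _) v]
  subst hc
  by_cases hm : v ∈ pk
  · simp [hm, (PySem.Set.mem_ofList pk v).mpr hm]
  · have : v ∉ PySem.Set.ofList pk := fun h => hm ((PySem.Set.mem_ofList pk v).mp h)
    simp [hm, this]

-- B's counting pass computes cov of the initial chromosome
lemma cnt0_spec (ps : List (List Int)) (ac : List Int) (l : List Nat)
    (d : PySem.Dict Int Int) (v : Int) :
    (l.foldl (fun (cnt : PySem.Dict Int Int) (k : Nat) =>
        if ac.getD k 0 == 1 then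
          (PySem.Set.ofList (ps.getD k [])).foldl
            (fun c x => c.insert x (c.getD x 0 + 1)) cnt
        else cnt) d).getD v 0
      = d.getD v 0 + (l.countP (covP ps ac v) : Int) := by
  induction l generalizing d with
  | nil => simp
  | cons k l ih =>
    simp only [List.foldl_cons, List.countP_cons]
    by_cases hk : ac.getD k 0 == 1
    · rw [if_pos hk, ih]
      rw [PySem.Dict.getD_foldl_insert_add_one]
      cases hc : ((ps.getD k []).contains v) <;>
        unfold covP <;>
          simp only [hk, hc, Bool.and_true, Bool.and_false, Bool.true_and] <;>
          rw [count_nodup_ofList_eq _ _ hc] <;> simp <;> push_cast <;> omega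
    · rw [if_neg hk, ih]
      unfold covP
      simp only [hk, Bool.false_and]
      simp


lemma getD_foldl_modify_sub (l : List Int) (d : PySem.Dict Int Int) (v : Int) :
    (l.foldl (fun (d : PySem.Dict Int Int) x => d.modify x 0 (fun t => t - 1)) d).getD v 0
      = d.getD v 0 - l.count v := by
  induction l generalizing d with
  | nil => simp
  | cons a l ih =>
    simp only [List.foldl_cons, List.count_cons, ih]
    rw [PySem.Dict.getD_modify]
    by_cases hva : v = a
    · subst hva
      simp only [if_pos rfl, beq_self_eq_true, if_true]
      push_cast
      ring
    · rw [if_neg hva]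
      have : (a == v) = false := by simp [Ne.symm hva]
      rw [this]
      simp

lemma getD_one_lt (a : List Int) (k : Nat) (h : a.getD k 0 = 1) : k < a.length := by
  by_contra hk
  rw [List.getD_eq_default _ _ (le_of_not_gt hk)] at h
  cases h

lemma countP_eq_len_iff (p : Nat → Bool) (m : Nat) :
    ((List.range m).countP p = m) ↔ ∀ j : Nat, j < m → p j := by
  constructor
  · intro h j hj
    have := (List.countP_eq_length (p := p)).mp (by rw [h, List.length_range])
    exact this j (List.mem_range.mpr hj)
  · intro h
    rw [(List.countP_eq_length (p := p)).mpr (fun j hj => h j (List.mem_range.mp hj)), List.length_range]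

-- A's redundancy test equals the reference condition
lemma condA_eq_condS (ps : List (List Int)) (a : List Int) (k : Nat)
    (h1 : a.getD k 0 = 1) :
    (((PySem.List.pyRange 0 ((((ps.getD k []).length : Nat) : Int) - 1) 1).foldl
        (fun (c1 : Int) (j : Int) =>
          if ((List.range a.length).foldl (fun (c2 : Int) (kk : Nat) =>
              if a.getD kk 0 == 1 && ((kk : Int) != (k : Int)) then
                if (ps.getD kk []).contains (PySem.List.pyGetD (ps.getD k []) j 0) then c2 + 1 else c2
              else c2) 0) ≥ 1
          then c1 + 1 else c1) 0)
      == ((((ps.getD k []).length : Nat) : Int) - 1))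
    = (!(ps.getD k []).isEmpty && (ps.getD k []).dropLast.all (fun v => decide (2 ≤ cov ps a v))) := by
  have hk : k < a.length := getD_one_lt a k h1
  by_cases hpi : ps.getD k [] = []
  · rw [hpi]
    simp only [List.length_nil, Nat.cast_zero, zero_sub]
    rw [PySem.List.pyRange_one_eq_nil (by omega)]
    simp
  · have hm : ((((ps.getD k []).length : Nat) : Int) - 1) = (((ps.getD k []).length - 1 : Nat) : Int) := by
      have : 1 ≤ (ps.getD k []).length := List.length_pos_iff.mpr hpi
      push_cast [this]
      omega
    rw [hm, PySem.List.pyRange_zero_natCast, List.foldl_map]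
    simp only [PySem.List.pyGetD_natCast]
    simp only [counter2_val]
    rw [foldl_count_ite]
    simp only [zero_add]
    have hlen : (ps.getD k []).length - 1 ≤ (ps.getD k []).length := by omega
    have hle := List.countP_le_length
      (p := fun j => decide ((((List.range a.length).countP
        (fun kk => (a.getD kk 0 == 1 && !(kk == k)) && (ps.getD kk []).contains ((ps.getD k []).getD j 0)) : Nat) : Int) ≥ 1))
      (l := List.range ((ps.getD k []).length - 1))
    rw [List.length_range] at hle
    have hiff : ∀ j : Nat, j < (ps.getD k []).length - 1 →
        ((1 : Int) ≤ (((List.range a.length).countP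
          (fun kk => (a.getD kk 0 == 1 && !(kk == k)) && (ps.getD kk []).contains ((ps.getD k []).getD j 0)) : Nat) : Int)
        ↔ 2 ≤ cov ps a ((ps.getD k []).getD j 0)) := by
      intro j hj
      have hjlen : j < (ps.getD k []).length := by omega
      have hv : (ps.getD k []).getD j 0 ∈ ps.getD k [] := by
        rw [List.getD_eq_getElem _ _ hjlen]
        exact List.getElem_mem hjlen
      exact counter2_pos_iff ps a k ((ps.getD k []).getD j 0) hk h1 hv
    rw [Bool.eq_iff_iff]
    simp only [beq_iff_eq, Nat.cast_inj, Bool.and_eq_true, Bool.not_eq_eq_eq_not, Bool.not_true,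
      List.isEmpty_eq_false_iff, List.all_eq_true, decide_eq_true_eq]
    constructor
    · intro hcnt
      have hall := (countP_eq_len_iff _ _).mp hcnt
      refine ⟨hpi, ?_⟩
      rw [forall_mem_dropLast (ps.getD k []) (fun v => 2 ≤ cov ps a v)]
      intro j hj
      have hq := hall j hj
      rw [decide_eq_true_eq] at hq
      exact (hiff j hj).mp hq
    · rintro ⟨-, hall⟩
      rw [forall_mem_dropLast (ps.getD k []) (fun v => 2 ≤ cov ps a v)] at hall
      apply (countP_eq_len_iff _ _).mpr
      intro j hj
      rw [decide_eq_true_eq]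
      exact (hiff j hj).mpr (hall j hj)

lemma A_eq (ac : List Int) (ps : List (List Int)) (h : goodIdx ps ac) :
    remove_extra_pairings ac ps = (List.range ac.length).foldl (stepS ps) ac := by
  unfold remove_extra_pairings
  simp only [PySem.List.pyRange_zero_natCast, List.foldl_map, PySem.List.pyGetD_natCast,
    PySem.List.pySetD_natCast]
  refine foldl_proj (fun st : List Int × Int => goodIdx ps st.1) _ (stepS ps) Prod.fst
    ?_ ?_ (List.range ac.length) (ac, 0) h
  · intro st k hP
    obtain ⟨a, c⟩ := st
    dsimp only
    by_cases h1 : a.getD k 0 = 1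
    · have hb : (a.getD k 0 == 1) = true := by simpa using h1
      rw [if_pos hb]
      rw [condA_eq_condS ps a k h1]
      unfold stepS
      rw [hb, Bool.true_and]
      cases hX : (!(ps.getD k []).isEmpty && (ps.getD k []).dropLast.all (fun v => decide (2 ≤ cov ps a v))) <;>
        simp [hX]
    · have hb : (a.getD k 0 == 1) = false := by simpa using h1
      rw [if_neg (by simpa [List.getD_eq_getElem?_getD] using h1)]
      unfold stepS
      rw [hb, Bool.false_and]
      simp
  · intro st k hP
    obtain ⟨a, c⟩ := st
    dsimp only
    split
    · split <;> first
      | exact goodIdx_set_zero ps a k hP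
      | exact hP
    · exact hP

lemma B_eq (ac : List Int) (ps : List (List Int)) (h : goodIdx ps ac) :
    remove_extra_pairings_alt ac ps = (List.range ac.length).foldl (stepS ps) ac := by
  unfold remove_extra_pairings_alt
  simp only [PySem.List.pyRange_zero_natCast, List.foldl_map, PySem.List.pyGetD_natCast,
    PySem.List.pySetD_natCast, PySem.List.slice_to_neg_one]
  refine foldl_proj (fun st : PySem.Dict Int Int × List Int =>
      (∀ v : Int, st.1.getD v 0 = ((cov ps st.2 v : Nat) : Int)) ∧ goodIdx ps st.2)
    _ (stepS ps) Prod.snd ?_ ?_ (List.range ac.length) _ ⟨?_, h⟩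
  · intro st k hP
    obtain ⟨cnt, a⟩ := st
    have hc : ∀ v : Int, cnt.getD v 0 = ((cov ps a v : Nat) : Int) := hP.1
    dsimp only
    by_cases h1 : a.getD k 0 = 1
    · have hb : (a.getD k 0 == 1) = true := by simpa using h1
      rw [if_pos hb]
      have hfun : (fun v => decide (cnt.getD v 0 ≥ 2)) = (fun v => decide (2 ≤ cov ps a v)) := by
        funext v
        exact decide_eq_decide.mpr (by rw [hc v]; omega)
      rw [hfun]
      unfold stepS
      rw [hb, Bool.true_and]
      cases hX : (!(ps.getD k []).isEmpty && (ps.getD k []).dropLast.all (fun v => decide (2 ≤ cov ps a v))) <;>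
        simp [hX]
    · have hb : (a.getD k 0 == 1) = false := by simpa using h1
      rw [if_neg (by simpa [List.getD_eq_getElem?_getD] using h1)]
      unfold stepS
      rw [hb, Bool.false_and]
      simp
  · intro st k hP
    obtain ⟨cnt, a⟩ := st
    have hc : ∀ v : Int, cnt.getD v 0 = ((cov ps a v : Nat) : Int) := hP.1
    have hg : goodIdx ps a := hP.2
    dsimp only
    split_ifs with h1 h2
    · have h1' : a.getD k 0 = 1 := by simpa using h1
      refine ⟨?_, goodIdx_set_zero ps a k hg⟩
      intro v
      dsimp only
      rw [getD_foldl_modify_sub, hc v]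
      have hcz := cov_set_zero ps a k (getD_one_lt a k h1') h1' v
      cases hcv : ((ps.getD k []).contains v) <;>
        rw [count_nodup_ofList_eq _ _ hcv] <;>
          rw [hcv] at hcz <;> simp at hcz ⊢ <;> omega
    · exact ⟨hc, hg⟩
    · exact ⟨hc, hg⟩
  · intro v
    rw [cnt0_spec]
    unfold cov
    simp

-- ===== VERDICT (by name: the statement is the Claim_ definition above) =====
theorem remove_extra_pairings_spec : Claim_equal_remove_extra_pairings := by
  intro ac ps _hdom hpre
  unfold Spec_remove_extra_pairings
  have hg : goodIdx ps ac := by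
    intro k hk
    by_cases hlen : k < ac.length
    · exact hpre k hlen hk
    · rw [List.getD_eq_default _ _ (le_of_not_gt hlen)] at hk; cases hk
  rw [A_eq ac ps hg, B_eq ac ps hg]
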